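-- pv_equiv track=rewrite | github.com/profeatmap/ProFeatMap | app.py | sortDataDict
-- ===== SOURCE A (Python) =====
-- def sortDataDict(data_dict, FT_order_list) :
-- 	"""
-- 		DESCRIPTION: From an exsisting data_dict, creates a new dict sorted in the order defined in the FT_order_list.
-- 			The order is used in the map drawing process.
-- 	"""
--
-- 	# Initialize new dict
-- 	new_dict = {}
--
-- 	# If the FT_order_list if not given, do not change the order.
-- 	if FT_order_list == [''] :
-- 		new_dict = data_dict
-- 	else :
-- 		# Initialize dict for each protein
-- 		for protein in data_dict :
-- 			new_dict[protein] = {}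
--
-- 		# For each feature type in FT_order_list, add data first
-- 		for FT in FT_order_list :
-- 			for protein in data_dict :
-- 				for FT_ID, data in data_dict[protein].items() :
-- 					if data_dict[protein][FT_ID][0] == FT :
-- 						new_dict[protein][FT_ID] = data
--
-- 		# Complete data for all feature type not in FT_order_list
-- 		for protein in data_dict :
-- 			for FT_ID, data in data_dict[protein].items() :
-- 				if data[0] not in FT_order_list :
-- 					new_dict[protein][FT_ID] = data
--
-- 	return  new_dict
-- ===== SOURCE B (Python) =====
-- def sortDataDict(data_dict, FT_order_list):
--     """Single-pass bucketing re-implementation: group each protein's features by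
--     type once, then emit buckets in FT_order_list order followed by leftovers."""
--     if FT_order_list == ['']:
--         return data_dict
--     order = list(dict.fromkeys(FT_order_list))
--     new_dict = {}
--     for protein, feats in data_dict.items():
--         buckets = {ft: [] for ft in order}
--         leftovers = []
--         for FT_ID, data in feats.items():
--             if data[0] in buckets:
--                 buckets[data[0]].append((FT_ID, data))
--             else:
--                 leftovers.append((FT_ID, data))
--         pairs = []
--         for ft in order:
--             pairs.extend(buckets[ft])
--         new_dict[protein] = dict(pairs + leftovers)
--     return new_dict
-- ===== Notes on version B (the rewrite author's own statement) =====
-- stated objective: faster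
-- what changed: A rescans every protein's whole feature dict once per entry of FT_order_list (with a list-membership scan per leftover item); B makes a single bucketing pass per protein, grouping features by type into a dict of buckets, then concatenates the buckets in first-occurrence order of FT_order_list followed by the leftovers.
import Mathlib
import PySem

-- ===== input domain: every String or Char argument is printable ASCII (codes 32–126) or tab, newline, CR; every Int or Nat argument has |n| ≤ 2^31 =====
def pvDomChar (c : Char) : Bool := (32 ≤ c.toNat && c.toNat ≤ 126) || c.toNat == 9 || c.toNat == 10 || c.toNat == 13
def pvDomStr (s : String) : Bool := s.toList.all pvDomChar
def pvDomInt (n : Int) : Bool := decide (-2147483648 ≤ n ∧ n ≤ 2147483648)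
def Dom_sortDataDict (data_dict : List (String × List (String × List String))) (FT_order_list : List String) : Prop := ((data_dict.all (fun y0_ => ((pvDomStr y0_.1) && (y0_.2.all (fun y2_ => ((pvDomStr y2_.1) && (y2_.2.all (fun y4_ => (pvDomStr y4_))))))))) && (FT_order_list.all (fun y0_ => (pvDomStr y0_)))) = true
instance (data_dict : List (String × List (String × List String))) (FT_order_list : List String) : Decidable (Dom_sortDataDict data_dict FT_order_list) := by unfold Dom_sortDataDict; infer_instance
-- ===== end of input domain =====

-- B replaces A's repeated full scans (one per feature type) by a single bucketing pass per protein; equivalence is proved for duplicate-free association lists.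


-- data[0] for a data list (Pre_ guarantees the list is nonempty wherever Python evaluates it)
def pvHd0 (l : List String) : String := (PySem.List.pyGet? l 0).getD ""

-- ===== PORT A =====
def sortDataDict (data_dict : List (String × List (String × List String))) (FT_order_list : List String) : List (String × List (String × List String)) :=
  if FT_order_list = [""] then data_dict
  else
    -- new_dict[protein] = {}
    let nd0 : PySem.Dict String (PySem.Dict String (List String)) :=
      data_dict.foldl (fun nd p => nd.insert p.1 PySem.Dict.empty) PySem.Dict.empty
    -- for FT in FT_order_list: for protein …: for FT_ID, data …: if data[0] == FT: new_dict[protein][FT_ID] = data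
    let nd1 := FT_order_list.foldl (fun nd FT =>
      data_dict.foldl (fun nd p =>
        p.2.foldl (fun nd q =>
          if pvHd0 q.2 = FT then nd.modify p.1 PySem.Dict.empty (fun inner => inner.insert q.1 q.2)
          else nd) nd) nd) nd0
    -- leftovers: if data[0] not in FT_order_list: new_dict[protein][FT_ID] = data
    let nd2 := data_dict.foldl (fun nd p =>
      p.2.foldl (fun nd q =>
        if pvHd0 q.2 ∈ FT_order_list then nd
        else nd.modify p.1 PySem.Dict.empty (fun inner => inner.insert q.1 q.2)) nd) nd1
    nd2.items.map (fun kv => (kv.1, kv.2.items))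

-- ===== PORT B =====
def sortDataDict_alt (data_dict : List (String × List (String × List String))) (FT_order_list : List String) : List (String × List (String × List String)) :=
  if FT_order_list = [""] then data_dict
  else
    let order := PySem.List.dedup FT_order_list
    let nd := data_dict.foldl (fun nd p =>
      -- buckets = {ft: [] for ft in order}
      let buckets0 : PySem.Dict String (List (String × List String)) :=
        order.foldl (fun b ft => b.insert ft []) PySem.Dict.empty
      -- one pass: bucket by type, or append to leftovers
      let bl := p.2.foldl (fun (bl : PySem.Dict String (List (String × List String)) × List (String × List String)) q =>
        if bl.1.contains (pvHd0 q.2) then (bl.1.modify (pvHd0 q.2) [] (fun xs => xs ++ [(q.1, q.2)]), bl.2)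
        else (bl.1, bl.2 ++ [(q.1, q.2)])) (buckets0, ([] : List (String × List String)))
      -- pairs = concatenation of buckets in order
      let pairs := order.foldl (fun acc ft => acc ++ bl.1.getD ft []) []
      nd.insert p.1 (PySem.Dict.ofList (pairs ++ bl.2))) PySem.Dict.empty
    nd.items.map (fun kv => (kv.1, kv.2.items))

-- ===== PRECONDITION & SPEC =====
-- Pre_ excludes (a) association lists with duplicate protein keys or duplicate feature-ID keys
-- (no Python dict has duplicate keys, so behaviour there is an accident of the list representation), and
-- (b) inputs where some feature's data list is empty while FT_order_list ≠ [''] — there Python A raises IndexError on data[0].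
def Pre_sortDataDict (data_dict : List (String × List (String × List String))) (FT_order_list : List String) : Prop :=
  (data_dict.map Prod.fst).Nodup ∧ (∀ p ∈ data_dict, (p.2.map Prod.fst).Nodup) ∧
  (FT_order_list = [""] ∨ ∀ p ∈ data_dict, ∀ q ∈ p.2, q.2 ≠ [])
instance (data_dict : List (String × List (String × List String))) (FT_order_list : List String) : Decidable (Pre_sortDataDict data_dict FT_order_list) := by unfold Pre_sortDataDict; infer_instance

def pvWitness_sortDataDict : (List (String × List (String × List String))) × List String :=
  ([("P1", [("f1", ["A", "x"]), ("f2", ["B"]), ("f3", ["A"]), ("f4", ["C"])]), ("P2", [("g1", ["B"])])], ["B", "A"])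

def Spec_sortDataDict (data_dict : List (String × List (String × List String))) (FT_order_list : List String) (out : List (String × List (String × List String))) : Prop := out = sortDataDict_alt data_dict FT_order_list
instance (data_dict : List (String × List (String × List String))) (FT_order_list : List String) (out : List (String × List (String × List String))) : Decidable (Spec_sortDataDict data_dict FT_order_list out) := by unfold Spec_sortDataDict; infer_instance

-- ===== CLAIM (what is proved, stated in full; the proofs are below) =====
def Claim_equal_sortDataDict : Prop := ∀ (data_dict : List (String × List (String × List String))) (FT_order_list : List String), Dom_sortDataDict data_dict FT_order_list → Pre_sortDataDict data_dict FT_order_list → Spec_sortDataDict data_dict FT_order_list (sortDataDict data_dict FT_order_list)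

-- ===== LEMMAS AND PROOFS =====

theorem key_inj {β : Type} {l : List (String × β)} (hn : (l.map Prod.fst).Nodup)
    {q1 q2 : String × β} (h1 : q1 ∈ l) (h2 : q2 ∈ l) (he : q1.1 = q2.1) : q1 = q2 := by
  have hl : l.Nodup := hn.of_map _
  exact (List.nodup_map_iff_inj_on hl).mp hn q1 h1 q2 h2 he

theorem dict_insert_eq_self {κ ν : Type} [BEq κ] [LawfulBEq κ] (d : PySem.Dict κ ν) (k : κ) (v : ν)
    (hn : d.keys.Nodup) (h : d.get? k = some v) : d.insert k v = d := by
  have hc : d.contains k = true := by rw [PySem.Dict.contains_eq_isSome_get?, h]; rfl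
  apply PySem.Dict.ext
  rw [PySem.Dict.items_insert_of_contains d v hc]
  conv_rhs => rw [← List.map_id d.items]
  apply List.map_congr_left
  intro p hp
  by_cases hk : p.1 = k
  · have hmem : (p.1, p.2) ∈ d.items := hp
    have : d.get? p.1 = some p.2 := PySem.Dict.get?_of_mem_items d hmem hn
    rw [hk] at this; rw [this] at h
    simp only [hk, beq_self_eq_true, if_pos]
    rw [show v = p.2 from (Option.some_inj.mp h).symm, ← hk]
    rfl
  · simp [hk]

theorem dict_modify_modify_self {κ ν : Type} [BEq κ] [LawfulBEq κ] (d : PySem.Dict κ ν) (k : κ)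
    (d0 : ν) (f g : ν → ν) : (d.modify k d0 f).modify k d0 g = d.modify k d0 (fun v => g (f v)) := by
  show (d.insert k (f (d.getD k d0))).insert k (g ((d.insert k (f (d.getD k d0))).getD k d0)) = _
  rw [PySem.Dict.getD_insert_self, PySem.Dict.insert_insert_self]
  rfl

theorem dict_modify_id {κ ν : Type} [BEq κ] [LawfulBEq κ] (d : PySem.Dict κ ν) (k : κ) (d0 : ν)
    (hn : d.keys.Nodup) (hc : d.contains k = true) : d.modify k d0 (fun v => v) = d := by
  rw [PySem.Dict.contains_eq_isSome_get?] at hc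
  obtain ⟨v, hv⟩ := Option.isSome_iff_exists.mp hc
  show d.insert k (d.getD k d0) = d
  rw [PySem.Dict.getD_eq_get?_getD, hv]
  exact dict_insert_eq_self d k v hn hv

theorem foldl_ite_modify {γ ν : Type} (k : String) (d0 : ν) (c : γ → Prop) [DecidablePred c]
    (f : γ → ν → ν) : ∀ (l : List γ) (nd : PySem.Dict String ν), nd.keys.Nodup → nd.contains k = true →
    l.foldl (fun nd q => if c q then nd.modify k d0 (f q) else nd) nd
    = nd.modify k d0 (fun v => (l.filter (fun q => decide (c q))).foldl (fun v q => f q v) v) := by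
  intro l
  induction l with
  | nil => intro nd hn hc; simp [dict_modify_id nd k d0 hn hc]
  | cons q t ih =>
    intro nd hn hc
    by_cases hq : c q
    · have hn' : (nd.modify k d0 (f q)).keys.Nodup := PySem.Dict.nodup_keys_insert _ _ _ hn
      have hc' : (nd.modify k d0 (f q)).contains k = true := by
        rw [PySem.Dict.contains_modify]; simp
      simp only [List.foldl_cons, if_pos hq, List.filter_cons, decide_eq_true hq]
      rw [ih _ hn' hc', dict_modify_modify_self]
      simp
    · simp only [List.foldl_cons, if_neg hq, List.filter_cons]
      rw [ih _ hn hc]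
      simp [hq]

theorem pass_items {β γ ν : Type} (d0 : ν) (S : String × β → List γ) (c : String × β → γ → Prop)
    [inst : ∀ p q, Decidable (c p q)] (f : γ → ν → ν) :
    ∀ (l : List (String × β)) (pre : List (String × ν)) (G : String × β → ν) (nd : PySem.Dict String ν),
    nd.items = pre ++ l.map (fun p => (p.1, G p)) →
    ((pre.map Prod.fst) ++ l.map Prod.fst).Nodup →
    (l.foldl (fun nd p => (S p).foldl (fun nd q => if c p q then nd.modify p.1 d0 (f q) else nd) nd) nd).items
    = pre ++ l.map (fun p => (p.1, ((S p).filter (fun q => decide (c p q))).foldl (fun v q => f q v) (G p))) := by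
  intro l
  induction l with
  | nil => intro pre G nd hitems _; simpa using hitems
  | cons p t ih =>
    intro pre G nd hitems hn
    rw [List.map_cons] at hn
    have hkeys : nd.keys = pre.map Prod.fst ++ p.1 :: t.map Prod.fst := by
      simp only [PySem.Dict.keys, hitems, List.map_append, List.map_cons, List.map_map]
      rfl
    have hknd : nd.keys.Nodup := by
      rw [hkeys]
      simpa using hn
    have hmem : (p.1, G p) ∈ nd.items := by
      rw [hitems]; exact List.mem_append_right _ (List.mem_cons_self ..)
    have hc : nd.contains p.1 = true := by
      rw [PySem.Dict.contains_iff_mem_keys, hkeys]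
      exact List.mem_append_right _ (List.mem_cons_self ..)
    have hgd : nd.getD p.1 d0 = G p := PySem.Dict.getD_of_mem_items nd hmem hknd d0
    -- p.1 is not a key of pre nor of t
    have hpre : ∀ e ∈ pre, e.1 ≠ p.1 := by
      intro e he hee
      have hdis := (List.nodup_append.mp hn).2.2
      exact hdis e.1 (List.mem_map_of_mem (f := Prod.fst) he) p.1 (List.mem_cons_self ..) hee
    have ht : ∀ e ∈ t, e.1 ≠ p.1 := by
      intro e he hee
      have h2 := (List.nodup_append.mp hn).2.1
      rw [List.nodup_cons] at h2
      exact h2.1 (hee ▸ List.mem_map_of_mem (f := Prod.fst) he)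
    set v' : ν := ((S p).filter (fun q => decide (c p q))).foldl (fun v q => f q v) (G p) with hv'
    have hstep : ((S p).foldl (fun nd q => if c p q then nd.modify p.1 d0 (f q) else nd) nd)
        = nd.insert p.1 v' := by
      rw [foldl_ite_modify p.1 d0 (c p) f (S p) nd hknd hc]
      show nd.insert p.1 _ = _
      rw [hgd]
    have hitems' : (nd.insert p.1 v').items = (pre ++ [(p.1, v')]) ++ t.map (fun p => (p.1, G p)) := by
      rw [PySem.Dict.items_insert_of_contains nd v' hc, hitems]
      simp only [List.map_append, List.map_cons, List.map_map]
      have e1 : pre.map (fun e => if (e.1 == p.1) = true then (p.1, v') else e) = pre := by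
        conv_rhs => rw [← List.map_id pre]
        apply List.map_congr_left
        intro e he
        simp [hpre e he]
      have e2 : t.map ((fun e => if (e.1 == p.1) = true then (p.1, v') else e) ∘ (fun p => (p.1, G p)))
          = t.map (fun p => (p.1, G p)) := by
        apply List.map_congr_left
        intro e he
        simp [Function.comp, ht e he]
      rw [e1, e2]
      simp
    rw [List.foldl_cons, hstep]
    have hn2 : ((pre ++ [(p.1, v')]).map Prod.fst ++ t.map Prod.fst).Nodup := by
      rw [List.map_append]
      simpa [← List.append_cons] using hn
    rw [ih (pre ++ [(p.1, v')]) G (nd.insert p.1 v') hitems' hn2]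
    simp
    exact hv'

def canonPairs (feats : List (String × List String)) (fts : List String) : List (String × List String) :=
  (PySem.Set.ofList fts).flatMap (fun ft => feats.filter (fun q => decide (pvHd0 q.2 = ft)))
  ++ feats.filter (fun q => !decide (pvHd0 q.2 ∈ fts))

theorem flat_keys_nodup (feats : List (String × List String)) (hn : (feats.map Prod.fst).Nodup)
    (s : List String) (hs : s.Nodup) :
    ((s.flatMap (fun ft => feats.filter (fun q => decide (pvHd0 q.2 = ft)))).map Prod.fst).Nodup := by
  induction s with
  | nil => simp
  | cons ft rest ih =>
    rw [List.flatMap_cons, List.map_append, List.nodup_append]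
    refine ⟨?_, ih hs.of_cons, ?_⟩
    · exact hn.sublist ((List.filter_sublist (l := feats)).map Prod.fst)
    · intro a ha b hb hab
      obtain ⟨q1, hq1, rfl⟩ := List.mem_map.mp ha
      obtain ⟨q2, hq2, rfl⟩ := List.mem_map.mp hb
      obtain ⟨ft', hft', hq2'⟩ := List.mem_flatMap.mp hq2
      have e1 := List.mem_filter.mp hq1
      have e2 := List.mem_filter.mp hq2'
      have hq12 : q1 = q2 := key_inj hn e1.1 e2.1 hab
      have c1 : pvHd0 q1.2 = ft := of_decide_eq_true e1.2
      have c2 : pvHd0 q2.2 = ft' := of_decide_eq_true e2.2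
      rw [hq12, c2] at c1
      exact (List.nodup_cons.mp hs).1 (c1 ▸ hft')

theorem canon_keys_nodup (feats : List (String × List String)) (fts : List String)
    (hn : (feats.map Prod.fst).Nodup) : ((canonPairs feats fts).map Prod.fst).Nodup := by
  rw [canonPairs, List.map_append, List.nodup_append]
  refine ⟨flat_keys_nodup feats hn _ (PySem.Set.nodup_ofList fts), hn.sublist ((List.filter_sublist (l := feats)).map Prod.fst), ?_⟩
  intro a ha b hb hab
  obtain ⟨q1, hq1, rfl⟩ := List.mem_map.mp ha
  obtain ⟨q2, hq2, rfl⟩ := List.mem_map.mp hb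
  obtain ⟨ft', hft', hq1'⟩ := List.mem_flatMap.mp hq1
  have e1 := List.mem_filter.mp hq1'
  have e2 := List.mem_filter.mp hq2
  have hq12 : q1 = q2 := key_inj hn e1.1 e2.1 hab
  have c1 : pvHd0 q1.2 = ft' := of_decide_eq_true e1.2
  have c2 : pvHd0 q2.2 ∉ fts := by simpa using e2.2
  exact c2 (hq12 ▸ c1 ▸ (PySem.Set.mem_ofList fts ft').mp hft')

-- a fold of inserts whose bindings are all already present is the identity
theorem foldl_insert_noop {κ ν : Type} [BEq κ] [LawfulBEq κ] :
    ∀ (l : List (κ × ν)) (d : PySem.Dict κ ν), d.keys.Nodup →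
    (∀ q ∈ l, d.get? q.1 = some q.2) →
    l.foldl (fun v q => v.insert q.1 q.2) d = d := by
  intro l
  induction l with
  | nil => intro d _ _; rfl
  | cons q t ih =>
    intro d hn h
    rw [List.foldl_cons, dict_insert_eq_self d q.1 q.2 hn (h q (List.mem_cons_self ..))]
    exact ih d hn (fun q hq => h q (List.mem_cons_of_mem _ hq))

theorem A_stage1 (feats : List (String × List String)) (hn : (feats.map Prod.fst).Nodup) :
    ∀ (fts0 s : List String) (d : PySem.Dict String (List String)), s.Nodup →
    d.items = s.flatMap (fun ft => feats.filter (fun q => decide (pvHd0 q.2 = ft))) →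
    (fts0.foldl (fun v ft => (feats.filter (fun q => decide (pvHd0 q.2 = ft))).foldl (fun v q => v.insert q.1 q.2) v) d).items
    = (PySem.Set.update s fts0).flatMap (fun ft => feats.filter (fun q => decide (pvHd0 q.2 = ft))) := by
  intro fts0
  induction fts0 with
  | nil => intro s d _ hd; simpa [PySem.Set.update] using hd
  | cons ft rest ih =>
    intro s d hs hd
    have hkeys : d.keys = (s.flatMap (fun ft => feats.filter (fun q => decide (pvHd0 q.2 = ft)))).map Prod.fst := by
      simp only [PySem.Dict.keys, hd]
    have hknd : d.keys.Nodup := by rw [hkeys]; exact flat_keys_nodup feats hn s hs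
    rw [List.foldl_cons]
    by_cases hft : ft ∈ s
    · have hnoop : (feats.filter (fun q => decide (pvHd0 q.2 = ft))).foldl (fun v q => v.insert q.1 q.2) d = d := by
        apply foldl_insert_noop _ d hknd
        intro q hq
        have hmem : (q.1, q.2) ∈ d.items := by
          rw [hd]
          exact List.mem_flatMap.mpr ⟨ft, hft, hq⟩
        exact PySem.Dict.get?_of_mem_items d hmem hknd
      rw [hnoop]
      have hadd : PySem.Set.add s ft = s := by
        simp [PySem.Set.add, hft]
      rw [show PySem.Set.update s (ft :: rest) = PySem.Set.update (PySem.Set.add s ft) rest from rfl, hadd]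
      exact ih s d hs hd
    · have hfresh : ∀ q ∈ feats.filter (fun q => decide (pvHd0 q.2 = ft)), d.contains q.1 = false := by
        intro q hq
        rw [← Bool.not_eq_true]
        intro hcon
        rw [PySem.Dict.contains_iff_mem_keys, hkeys] at hcon
        obtain ⟨q', hq', hqk⟩ := List.mem_map.mp hcon
        obtain ⟨ft', hft', hq''⟩ := List.mem_flatMap.mp hq'
        have e1 := List.mem_filter.mp hq''
        have e2 := List.mem_filter.mp hq
        have : q' = q := key_inj hn e1.1 e2.1 hqk
        have c1 : pvHd0 q'.2 = ft' := of_decide_eq_true e1.2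
        have c2 : pvHd0 q.2 = ft := of_decide_eq_true e2.2
        rw [this, c2] at c1
        exact hft (c1 ▸ hft')
      have hfnd : ((feats.filter (fun q => decide (pvHd0 q.2 = ft))).map Prod.fst).Nodup :=
        hn.sublist ((List.filter_sublist (l := feats)).map Prod.fst)
      have hins := PySem.Dict.items_foldl_insert_fresh (κ := String) (ν := List String) (β := String × List String)
        (feats.filter (fun q => decide (pvHd0 q.2 = ft))) Prod.fst Prod.snd d hfresh hfnd
      have hadd : PySem.Set.add s ft = s ++ [ft] := by
        simp [PySem.Set.add, hft]
      rw [show PySem.Set.update s (ft :: rest) = PySem.Set.update (PySem.Set.add s ft) rest from rfl, hadd]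
      apply ih (s ++ [ft]) _ (by simp [List.nodup_append, hs]; intro a ha h; exact hft (h ▸ ha))
      rw [hins, hd]
      simp

theorem A_value_items (feats : List (String × List String)) (fts : List String)
    (hn : (feats.map Prod.fst).Nodup) :
    ((feats.filter (fun q => !decide (pvHd0 q.2 ∈ fts))).foldl (fun v q => v.insert q.1 q.2)
      (fts.foldl (fun v ft => (feats.filter (fun q => decide (pvHd0 q.2 = ft))).foldl (fun v q => v.insert q.1 q.2) v) PySem.Dict.empty)).items
    = canonPairs feats fts := by
  have h1 := A_stage1 feats hn fts [] PySem.Dict.empty (by simp) (by rfl)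
  have hup : PySem.Set.update ([] : List String) fts = PySem.Set.ofList fts := by
    rw [PySem.Set.ofList_eq_foldl]; rfl
  rw [hup] at h1
  generalize hgen : (fts.foldl (fun v ft => (feats.filter (fun q => decide (pvHd0 q.2 = ft))).foldl (fun v q => v.insert q.1 q.2) v) PySem.Dict.empty) = d1 at h1 ⊢
  have hkeys : d1.keys = ((PySem.Set.ofList fts).flatMap (fun ft => feats.filter (fun q => decide (pvHd0 q.2 = ft)))).map Prod.fst := by
    simp only [PySem.Dict.keys, h1]
  have hknd : d1.keys.Nodup := by
    rw [hkeys]; exact flat_keys_nodup feats hn _ (PySem.Set.nodup_ofList fts)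
  have hfresh : ∀ q ∈ feats.filter (fun q => !decide (pvHd0 q.2 ∈ fts)), d1.contains q.1 = false := by
    intro q hq
    rw [← Bool.not_eq_true]
    intro hcon
    rw [PySem.Dict.contains_iff_mem_keys, hkeys] at hcon
    obtain ⟨q', hq', hqk⟩ := List.mem_map.mp hcon
    obtain ⟨ft', hft', hq''⟩ := List.mem_flatMap.mp hq'
    have e1 := List.mem_filter.mp hq''
    have e2 := List.mem_filter.mp hq
    have heq : q' = q := key_inj hn e1.1 e2.1 hqk
    have c1 : pvHd0 q'.2 = ft' := of_decide_eq_true e1.2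
    have c2 : pvHd0 q.2 ∉ fts := by simpa using e2.2
    exact c2 (heq ▸ c1 ▸ (PySem.Set.mem_ofList fts ft').mp hft')
  have hfnd : ((feats.filter (fun q => !decide (pvHd0 q.2 ∈ fts))).map Prod.fst).Nodup :=
    hn.sublist ((List.filter_sublist (l := feats)).map Prod.fst)
  have hins := PySem.Dict.items_foldl_insert_fresh (κ := String) (ν := List String) (β := String × List String)
    (feats.filter (fun q => !decide (pvHd0 q.2 ∈ fts))) Prod.fst Prod.snd d1 hfresh hfnd
  rw [hins, h1]
  simp [canonPairs]

theorem A_phase2_items (dd : List (String × List (String × List String))) (hn : (dd.map Prod.fst).Nodup) :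
    ∀ (fts0 : List String) (H : String × List (String × List String) → PySem.Dict String (List String)) (nd : PySem.Dict String (PySem.Dict String (List String))),
    nd.items = dd.map (fun p => (p.1, H p)) →
    (fts0.foldl (fun nd FT => dd.foldl (fun nd p => p.2.foldl (fun nd q => if pvHd0 q.2 = FT then nd.modify p.1 PySem.Dict.empty (fun inner => inner.insert q.1 q.2) else nd) nd) nd) nd).items
    = dd.map (fun p => (p.1, fts0.foldl (fun v ft => (p.2.filter (fun q => decide (pvHd0 q.2 = ft))).foldl (fun v q => v.insert q.1 q.2) v) (H p))) := by
  intro fts0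
  induction fts0 with
  | nil => intro H nd h; simpa using h
  | cons FT rest ih =>
    intro H nd h
    rw [List.foldl_cons]
    have hp := pass_items (d0 := PySem.Dict.empty) (S := fun p => p.2) (c := fun _ q => pvHd0 q.2 = FT)
      (f := fun q inner => inner.insert q.1 q.2) dd [] H nd (by simpa using h) (by simpa using hn)
    rw [ih (fun p => ((p.2.filter (fun q => decide (pvHd0 q.2 = FT))).foldl (fun v q => v.insert q.1 q.2) (H p))) _ (by simpa using hp)]
    simp only [List.foldl_cons]

theorem A_eq_canon (dd : List (String × List (String × List String))) (fts : List String)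
    (hft : ¬ fts = [""]) (h1 : (dd.map Prod.fst).Nodup) (h2 : ∀ p ∈ dd, (p.2.map Prod.fst).Nodup) :
    sortDataDict dd fts = dd.map (fun p => (p.1, canonPairs p.2 fts)) := by
  simp only [sortDataDict, if_neg hft]
  have h0 := PySem.Dict.items_foldl_insert_fresh (κ := String) (ν := PySem.Dict String (List String))
    (β := String × List (String × List String)) dd Prod.fst (fun _ => PySem.Dict.empty) PySem.Dict.empty
    (by intro a _; rfl) h1
  have hph2 := A_phase2_items dd h1 fts (fun _ => PySem.Dict.empty) _ (by simpa using h0)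
  -- flip the if in phase 3
  have hflip : (fun (nd : PySem.Dict String (PySem.Dict String (List String))) (p : String × List (String × List String)) =>
      p.2.foldl (fun nd q => if pvHd0 q.2 ∈ fts then nd else nd.modify p.1 PySem.Dict.empty (fun inner => inner.insert q.1 q.2)) nd)
      = (fun nd p => p.2.foldl (fun nd q => if ¬ (pvHd0 q.2 ∈ fts) then nd.modify p.1 PySem.Dict.empty (fun inner => inner.insert q.1 q.2) else nd) nd) := by
    funext nd p
    congr 1
    funext nd q
    by_cases hq : pvHd0 q.2 ∈ fts <;> simp [hq]
  rw [hflip]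
  have hph3 := pass_items (d0 := PySem.Dict.empty) (S := fun p => p.2) (c := fun _ q => ¬ (pvHd0 q.2 ∈ fts))
    (f := fun q inner => inner.insert q.1 q.2) dd []
    (fun p => fts.foldl (fun v ft => (p.2.filter (fun q => decide (pvHd0 q.2 = ft))).foldl (fun v q => v.insert q.1 q.2) v) PySem.Dict.empty)
    _ (by simpa using hph2) (by simpa using h1)
  rw [hph3]
  simp only [List.nil_append, List.map_map]
  apply List.map_congr_left
  intro p hp
  simp only [Function.comp]
  congr 1
  have := A_value_items p.2 fts (h2 p hp)
  simp only [decide_not] at this ⊢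
  exact this

theorem dict_ofList_items {κ ν : Type} [BEq κ] [LawfulBEq κ] (ps : List (κ × ν))
    (hn : (ps.map Prod.fst).Nodup) : (PySem.Dict.ofList ps).items = ps := by
  have h := PySem.Dict.items_foldl_insert_fresh (κ := κ) (ν := ν) (β := κ × ν)
    ps Prod.fst Prod.snd PySem.Dict.empty (by intro a _; rfl) hn
  show (PySem.Dict.empty.update ps).items = ps
  show (ps.foldl (fun acc p => acc.insert p.1 p.2) PySem.Dict.empty).items = ps
  rw [h]
  show ([] : List (κ × ν)) ++ ps.map (fun a => (a.1, a.2)) = ps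
  simp

-- buckets0 facts
theorem b0_items (order : List String) (hno : order.Nodup) :
    (order.foldl (fun b ft => b.insert ft ([] : List (String × List String))) PySem.Dict.empty).items
    = order.map (fun ft => (ft, [])) := by
  have h := PySem.Dict.items_foldl_insert_fresh (κ := String) (ν := List (String × List String))
    (β := String) order (fun ft => ft) (fun _ => []) PySem.Dict.empty (by intro a _; rfl) (by simpa using hno)
  simpa using h

theorem bfold (order : List String) :
    ∀ (feats : List (String × List String)) (b : PySem.Dict String (List (String × List String))) (lo : List (String × List String)),
    (∀ k, b.contains k = decide (k ∈ order)) →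
    ((feats.foldl (fun bl q =>
        if bl.1.contains (pvHd0 q.2) then (bl.1.modify (pvHd0 q.2) [] (fun xs => xs ++ [(q.1, q.2)]), bl.2)
        else (bl.1, bl.2 ++ [(q.1, q.2)])) (b, lo)).2
      = lo ++ feats.filter (fun q => !decide (pvHd0 q.2 ∈ order)))
    ∧ ∀ ft, (feats.foldl (fun bl q =>
        if bl.1.contains (pvHd0 q.2) then (bl.1.modify (pvHd0 q.2) [] (fun xs => xs ++ [(q.1, q.2)]), bl.2)
        else (bl.1, bl.2 ++ [(q.1, q.2)])) (b, lo)).1.getD ft []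
      = b.getD ft [] ++ (feats.filter (fun q => decide (pvHd0 q.2 ∈ order) && decide (pvHd0 q.2 = ft))) := by
  intro feats
  induction feats with
  | nil => intro b lo _; simp
  | cons q t ih =>
    intro b lo hb
    by_cases hq : pvHd0 q.2 ∈ order
    · have hcon : b.contains (pvHd0 q.2) = true := by rw [hb]; simpa using hq
      have hb' : ∀ k, (b.modify (pvHd0 q.2) [] (fun xs => xs ++ [(q.1, q.2)])).contains k = decide (k ∈ order) := by
        intro k
        rw [PySem.Dict.contains_modify, hb]
        by_cases hk : k = pvHd0 q.2 <;> simp [hk, hq]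
      have := ih (b.modify (pvHd0 q.2) [] (fun xs => xs ++ [(q.1, q.2)])) lo hb'
      constructor
      · rw [List.foldl_cons, if_pos hcon]
        rw [this.1]
        simp [hq]
      · intro ft
        rw [List.foldl_cons, if_pos hcon]
        rw [this.2 ft]
        rw [PySem.Dict.getD_modify]
        by_cases hft : ft = pvHd0 q.2
        · rw [if_pos hft, List.filter_cons]
          simp only [hft, decide_eq_true hq]
          simp [List.append_assoc]
        · rw [if_neg hft, List.filter_cons]
          have : (decide (pvHd0 q.2 ∈ order) && decide (pvHd0 q.2 = ft)) = false := by
            simp; intro h; exact fun hc => hft (hc.symm)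
          simp [this]
    · have hcon : b.contains (pvHd0 q.2) = false := by rw [hb]; simpa using hq
      have := ih b (lo ++ [(q.1, q.2)]) hb
      constructor
      · rw [List.foldl_cons, if_neg (by simp [hcon]), this.1, List.filter_cons]
        simp [hq]
      · intro ft
        rw [List.foldl_cons, if_neg (by simp [hcon]), this.2 ft, List.filter_cons]
        simp [hq]

theorem B_outer {ν : Type} (dd : List (String × List (String × List String)))
    (h1 : (dd.map Prod.fst).Nodup) (V : String × List (String × List String) → PySem.Dict String ν) :
    (dd.foldl (fun nd p => nd.insert p.1 (V p)) PySem.Dict.empty).items = dd.map (fun p => (p.1, V p)) := by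
  have h := PySem.Dict.items_foldl_insert_fresh (κ := String) (ν := PySem.Dict String ν)
    (β := String × List (String × List String)) dd Prod.fst V PySem.Dict.empty (by intro a _; rfl) h1
  rw [h]
  show ([] : List (String × PySem.Dict String ν)) ++ _ = _
  simp

theorem B_eq_canon (dd : List (String × List (String × List String))) (fts : List String)
    (hft : ¬ fts = [""]) (h1 : (dd.map Prod.fst).Nodup) (h2 : ∀ p ∈ dd, (p.2.map Prod.fst).Nodup) :
    sortDataDict_alt dd fts = dd.map (fun p => (p.1, canonPairs p.2 fts)) := by
  simp only [sortDataDict_alt, if_neg hft]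
  rw [B_outer dd h1]
  rw [List.map_map]
  apply List.map_congr_left
  intro p hp
  simp only [Function.comp]
  congr 1
  -- per-protein: the bucketed dict's items are canonPairs
  set order := PySem.List.dedup fts with horder
  have hno : order.Nodup := PySem.Set.nodup_ofList fts
  have hmemo : ∀ x, x ∈ order ↔ x ∈ fts := fun x => PySem.Set.mem_ofList fts x
  set b0 := order.foldl (fun b ft => b.insert ft ([] : List (String × List String))) PySem.Dict.empty with hb0
  have hitems0 : b0.items = order.map (fun ft => (ft, [])) := b0_items order hno
  have hkeys0 : b0.keys = order := by
    have hk : b0.keys = b0.items.map Prod.fst := rfl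
    rw [hk, hitems0, List.map_map]
    exact List.map_id' _
  have hcb0 : ∀ k, b0.contains k = decide (k ∈ order) := by
    intro k
    by_cases hk : k ∈ order
    · simp [PySem.Dict.contains_iff_mem_keys, hkeys0, hk]
    · simp only [hk, decide_false]
      rw [← Bool.not_eq_true]
      rw [PySem.Dict.contains_iff_mem_keys, hkeys0]
      exact hk
  have hgd0 : ∀ ft, b0.getD ft [] = [] := by
    intro ft
    by_cases hk : ft ∈ order
    · exact PySem.Dict.getD_of_mem_items b0 (by rw [hitems0]; exact List.mem_map_of_mem hk)
        (by rw [hkeys0]; exact hno) []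
    · exact PySem.Dict.getD_of_not_contains b0 [] (by rw [hcb0]; simpa using hk)
  have hbf := bfold order p.2 b0 [] hcb0
  set bl := p.2.foldl (fun bl q =>
      if bl.1.contains (pvHd0 q.2) then (bl.1.modify (pvHd0 q.2) [] (fun xs => xs ++ [(q.1, q.2)]), bl.2)
      else (bl.1, bl.2 ++ [(q.1, q.2)])) (b0, ([] : List (String × List String))) with hblh
  have hpairs : order.foldl (fun acc ft => acc ++ bl.1.getD ft []) []
      = order.flatMap (fun ft => bl.1.getD ft []) := by
    rw [PySem.List.foldl_append_eq_flatMap]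
    simp
  have hflat : order.flatMap (fun ft => bl.1.getD ft [])
      = order.flatMap (fun ft => p.2.filter (fun q => decide (pvHd0 q.2 = ft))) := by
    apply List.flatMap_congr
    intro ft hfto
    rw [hbf.2 ft, hgd0 ft]
    rw [List.nil_append]
    apply List.filter_congr
    intro q _
    by_cases h : pvHd0 q.2 = ft
    · simp [h]
      exact hfto
    · simp [h]
  have hlo : bl.2 = p.2.filter (fun q => !decide (pvHd0 q.2 ∈ fts)) := by
    rw [hbf.1, List.nil_append]
    apply List.filter_congr
    intro q _
    congr 1
    exact decide_eq_decide.mpr (hmemo (pvHd0 q.2))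
  rw [hpairs, hflat, hlo]
  rw [dict_ofList_items _ (by rw [show (order.flatMap (fun ft => p.2.filter (fun q => decide (pvHd0 q.2 = ft))) ++ p.2.filter (fun q => !decide (pvHd0 q.2 ∈ fts))) = canonPairs p.2 fts from rfl]; exact canon_keys_nodup p.2 fts (h2 p hp))]
  rfl


-- ===== VERDICT (by name: the statement is the Claim_ definition above) =====
theorem sortDataDict_spec : Claim_equal_sortDataDict := by
  intro dd fts _ hpre
  unfold Spec_sortDataDict
  by_cases hft : fts = [""]
  · simp [sortDataDict, sortDataDict_alt, hft]
  · rw [A_eq_canon dd fts hft hpre.1 hpre.2.1, B_eq_canon dd fts hft hpre.1 hpre.2.1]
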